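-- pv_equiv track=rewrite | github.com/jbarnet/motion_compare | main.py | partition_data_by_ids_and_sort
-- ===== SOURCE A (Python) =====
-- def partition_data_by_ids_and_sort(data_points):
--   data_by_ids = {}
--   for data_point in data_points:
--     id = data_point['id']
--     existing = data_by_ids.get(id, None)
--     if existing:
--       existing.append(data_point)
--     else:
--       data_by_ids[id] = [data_point]
--   for id, data in data_by_ids.items():
--     data_by_ids[id] = sorted(data, key=lambda x: x['timestamp'])
--   return data_by_ids
-- ===== SOURCE B (Python) =====
-- def partition_data_by_ids_and_sort(data_points):
--   # Dedup ids in first-appearance order, then build each bucket directly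
--   # as a sorted filter of the whole list -- no incremental grouping.
--   ids = list(dict.fromkeys(dp['id'] for dp in data_points))
--   return {i: sorted((dp for dp in data_points if dp['id'] == i),
--                     key=lambda x: x['timestamp'])
--           for i in ids}
-- ===== Notes on version B (the rewrite author's own statement) =====
-- stated objective: alternative
-- what changed: Instead of incrementally grouping into a dict and then sorting each bucket, B first dedups the ids in first-appearance order and then builds every bucket independently as sorted(filter of the whole list by that id); no mutable grouping state is maintained.
import Mathlib
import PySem

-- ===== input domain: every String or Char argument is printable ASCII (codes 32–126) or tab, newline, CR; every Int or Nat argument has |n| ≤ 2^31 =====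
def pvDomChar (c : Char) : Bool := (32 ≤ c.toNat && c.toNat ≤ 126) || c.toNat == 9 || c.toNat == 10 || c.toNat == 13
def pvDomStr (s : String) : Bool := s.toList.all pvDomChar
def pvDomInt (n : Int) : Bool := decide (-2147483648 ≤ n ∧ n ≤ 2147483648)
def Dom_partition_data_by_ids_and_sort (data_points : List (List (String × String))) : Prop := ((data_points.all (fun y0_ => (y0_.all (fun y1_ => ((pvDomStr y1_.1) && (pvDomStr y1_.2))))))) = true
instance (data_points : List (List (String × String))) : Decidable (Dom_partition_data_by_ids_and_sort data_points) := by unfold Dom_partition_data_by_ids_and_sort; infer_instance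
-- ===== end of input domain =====

-- B dedups the ids in first-appearance order and builds each bucket independently as a
-- sorted filter of the whole list, instead of A's incremental group-then-sort-each-bucket.

-- ===== PORT A =====
-- dp['id'] / dp['timestamp']: KeyError (= none) excluded by Pre_; getD "" is never reached on Pre_ inputs
def pvIdOf (data_point : List (String × String)) : String :=
  ((PySem.Dict.mk data_point).get? "id").getD ""
def pvTsOf (data_point : List (String × String)) : String :=
  ((PySem.Dict.mk data_point).get? "timestamp").getD ""

-- body of A's first loop: existing = d.get(id, None); if existing: existing.append(dp) else: d[id] = [dp]
-- (append mutates the stored list in place = overwrite at the same key position)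
def pvStepA (d : PySem.Dict String (List (List (String × String)))) (data_point : List (String × String)) :
    PySem.Dict String (List (List (String × String))) :=
  let id := pvIdOf data_point
  let existing := d.get? id
  if (match existing with | some ex => !ex.isEmpty | none => false) then
    d.insert id (existing.getD [] ++ [data_point])
  else
    d.insert id [data_point]

-- body of A's second loop: data_by_ids[id] = sorted(data, key=lambda x: x['timestamp'])
def pvSortStep (d : PySem.Dict String (List (List (String × String))))
    (p : String × List (List (String × String))) : PySem.Dict String (List (List (String × String))) :=
  d.insert p.1 (PySem.List.sorted p.2 (fun x => pvTsOf x))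

def partition_data_by_ids_and_sort (data_points : List (List (String × String))) :
    List (String × List (List (String × String))) :=
  let data_by_ids := data_points.foldl pvStepA PySem.Dict.empty
  (data_by_ids.items.foldl pvSortStep data_by_ids).items

-- ===== PORT B =====
-- sorted((dp for dp in data_points if dp['id'] == i), key=lambda x: x['timestamp'])
def pvBucket (data_points : List (List (String × String))) (i : String) :
    List (List (String × String)) :=
  PySem.List.sorted (data_points.filter (fun dp => pvIdOf dp == i)) (fun x => pvTsOf x)

def partition_data_by_ids_and_sort_alt (data_points : List (List (String × String))) :
    List (String × List (List (String × String))) :=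
  -- ids = list(dict.fromkeys(dp['id'] for dp in data_points))
  let ids := PySem.List.dedup (data_points.map (fun dp => pvIdOf dp))
  -- {i: sorted(..., key=ts) for i in ids}
  (ids.foldl (fun d i => d.insert i (pvBucket data_points i)) PySem.Dict.empty).items

-- ===== PRECONDITION & SPEC =====
-- Pre_ excludes exactly the inputs where both Pythons raise KeyError: a point missing 'id' or 'timestamp'.
def Pre_partition_data_by_ids_and_sort (data_points : List (List (String × String))) : Prop :=
  ∀ dp ∈ data_points, ((PySem.Dict.mk dp).contains "id") = true ∧ ((PySem.Dict.mk dp).contains "timestamp") = true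
instance (data_points : List (List (String × String))) : Decidable (Pre_partition_data_by_ids_and_sort data_points) := by
  unfold Pre_partition_data_by_ids_and_sort; infer_instance
def pvWitness_partition_data_by_ids_and_sort : (List (List (String × String))) :=
  ([[("id", "a"), ("timestamp", "2")], [("id", "b"), ("timestamp", "1")], [("id", "a"), ("timestamp", "1")]])
def Spec_partition_data_by_ids_and_sort (data_points : List (List (String × String))) (out : List (String × List (List (String × String)))) : Prop := out = partition_data_by_ids_and_sort_alt data_points
instance (data_points : List (List (String × String))) (out : List (String × List (List (String × String)))) : Decidable (Spec_partition_data_by_ids_and_sort data_points out) := by unfold Spec_partition_data_by_ids_and_sort; infer_instance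

-- ===== CLAIM (what is proved, stated in full; the proofs are below) =====
def Claim_equal_partition_data_by_ids_and_sort : Prop := ∀ (data_points : List (List (String × String))), Dom_partition_data_by_ids_and_sort data_points → Pre_partition_data_by_ids_and_sort data_points → Spec_partition_data_by_ids_and_sort data_points (partition_data_by_ids_and_sort data_points)

-- ===== LEMMAS AND PROOFS =====

-- proof-only abbreviation: A's loop body under the 'buckets never empty' invariant
def pvAppStep (d : PySem.Dict String (List (List (String × String)))) (data_point : List (String × String)) :
    PySem.Dict String (List (List (String × String))) :=
  d.modify (pvIdOf data_point) [] (· ++ [data_point])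

-- A's stored buckets are never empty; under that invariant A's loop body is exactly a modify-append.
def pvInv (d : PySem.Dict String (List (List (String × String)))) : Prop := ∀ j, d.get? j ≠ some []

lemma pvStepA_eq_app (d : PySem.Dict String (List (List (String × String)))) (dp : List (String × String))
    (h : pvInv d) : pvStepA d dp = pvAppStep d dp := by
  unfold pvStepA pvAppStep PySem.Dict.modify
  cases hg : d.get? (pvIdOf dp) with
  | none => simp [hg, PySem.Dict.getD_of_get?_eq_none _ _ hg]
  | some ex =>
    have hne : ex ≠ [] := fun he => h _ (he ▸ hg)
    simp [hg, PySem.Dict.getD_of_get?_eq_some _ _ hg, hne]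

lemma pvInv_app (d : PySem.Dict String (List (List (String × String)))) (dp : List (String × String))
    (h : pvInv d) : pvInv (pvAppStep d dp) := by
  intro j hj
  have hc : (pvAppStep d dp).contains j = true := by
    rw [PySem.Dict.contains_eq_isSome_get?, hj]; rfl
  have hD : (pvAppStep d dp).getD j [] = [] := PySem.Dict.getD_of_get?_eq_some _ _ hj
  rw [pvAppStep, PySem.Dict.getD_modify] at hD
  by_cases hk : j = pvIdOf dp
  · simp [hk] at hD
  · simp [hk] at hD
    rw [pvAppStep, PySem.Dict.contains_modify] at hc
    simp [hk] at hc
    have := PySem.Dict.contains_eq_isSome_get? d j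
    rw [hc] at this
    cases hg : d.get? j with
    | none => rw [hg] at this; simp at this
    | some v =>
      have := PySem.Dict.getD_of_get?_eq_some d ([]) hg
      rw [hD] at this
      exact h j (this ▸ hg)

lemma pvFoldA_eq (l : List (List (String × String))) (d : PySem.Dict String (List (List (String × String))))
    (h : pvInv d) : l.foldl pvStepA d = l.foldl pvAppStep d := by
  induction l generalizing d with
  | nil => rfl
  | cons dp t ih =>
    simp only [List.foldl_cons, pvStepA_eq_app d dp h]
    exact ih _ (pvInv_app d dp h)

-- value computed by A's (rewritten) grouping loop
lemma pvFoldApp_getD (l : List (List (String × String))) (d : PySem.Dict String (List (List (String × String))))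
    (k : String) : (l.foldl pvAppStep d).getD k [] = d.getD k [] ++ l.filter (fun dp => pvIdOf dp == k) := by
  have h1 : l.foldl pvAppStep d
      = (l.map (fun dp => (pvIdOf dp, dp))).foldl (fun d p => d.modify p.1 [] (fun x => x ++ [p.2])) d := by
    rw [List.foldl_map]; rfl
  rw [h1, PySem.Dict.getD_foldl_modify_append, List.filter_map, List.map_map]
  have h2 : ((fun x => x.2) ∘ fun dp => (pvIdOf dp, dp)) = (id : List (String × String) → _) := rfl
  have h3 : ((fun p => p.1 == k) ∘ fun dp => (pvIdOf dp, dp)) = fun dp => pvIdOf dp == k := rfl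
  rw [h2, h3, List.map_id]

-- A's second loop inserts once at each existing key
lemma pvSortFold_getD_not_mem (l : List (String × List (List (String × String))))
    (acc : PySem.Dict String (List (List (String × String)))) (k : String)
    (hk : k ∉ l.map (·.1)) :
    (l.foldl pvSortStep acc).getD k [] = acc.getD k [] := by
  induction l generalizing acc with
  | nil => rfl
  | cons p t ih =>
    simp only [List.map_cons, List.mem_cons, not_or] at hk
    rw [List.foldl_cons, ih _ hk.2, pvSortStep, PySem.Dict.getD_insert, if_neg hk.1]

lemma pvSortFold_getD_mem (l : List (String × List (List (String × String))))
    (acc : PySem.Dict String (List (List (String × String)))) (k : String) (v : List (List (String × String)))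
    (hnd : (l.map (·.1)).Nodup) (hmem : (k, v) ∈ l) :
    (l.foldl pvSortStep acc).getD k [] = PySem.List.sorted v (fun x => pvTsOf x) := by
  induction l generalizing acc with
  | nil => cases hmem
  | cons p t ih =>
    simp only [List.map_cons, List.nodup_cons] at hnd
    rcases List.mem_cons.mp hmem with he | ht
    · subst he
      rw [List.foldl_cons, pvSortFold_getD_not_mem _ _ _ hnd.1, pvSortStep,
        PySem.Dict.getD_insert, if_pos rfl]
    · exact ih _ hnd.2 ht

lemma pvSet_update_self (s : PySem.Set String) (xs : List String) (h : ∀ x ∈ xs, x ∈ s) :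
    PySem.Set.update s xs = s := by
  induction xs generalizing s with
  | nil => rfl
  | cons x t ih =>
    have hm := h x List.mem_cons_self
    have hx : PySem.Set.add s x = s := by
      simp [PySem.Set.add, PySem.Set.contains, hm]
    show PySem.Set.update (PySem.Set.add s x) t = s
    rw [hx]
    exact ih _ (fun y hy => h y (List.mem_cons_of_mem _ hy))

-- ===== VERDICT (by name: the statement is the Claim_ definition above) =====
theorem partition_data_by_ids_and_sort_spec : Claim_equal_partition_data_by_ids_and_sort := by
  unfold Claim_equal_partition_data_by_ids_and_sort
  intro dps _ _
  unfold Spec_partition_data_by_ids_and_sort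
  have hinv : pvInv PySem.Dict.empty := by
    intro j h; rw [PySem.Dict.get?_empty] at h; cases h
  have hA : partition_data_by_ids_and_sort dps
      = ((dps.foldl pvStepA PySem.Dict.empty).items.foldl pvSortStep
          (dps.foldl pvStepA PySem.Dict.empty)).items := rfl
  rw [hA, pvFoldA_eq dps _ hinv]
  -- B's dict comprehension over the deduped ids appends one fresh item per id
  have hndIds : (PySem.List.dedup (dps.map (fun dp => pvIdOf dp))).Nodup :=
    PySem.List.nodup_dedup _
  have hB : partition_data_by_ids_and_sort_alt dps
      = PySem.Dict.empty.items
        ++ (PySem.List.dedup (dps.map (fun dp => pvIdOf dp))).map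
            (fun i => (i, pvBucket dps i)) := by
    show ((PySem.List.dedup (dps.map (fun dp => pvIdOf dp))).foldl
        (fun d i => d.insert i (pvBucket dps i)) PySem.Dict.empty).items = _
    exact PySem.Dict.items_foldl_insert_fresh _ (fun i => i) _ _
      (fun a _ => PySem.Dict.contains_empty a) (by simp [hndIds])
  rw [hB]
  -- facts about A's grouping dict
  have hnd1 : (dps.foldl pvAppStep PySem.Dict.empty).keys.Nodup :=
    PySem.Dict.nodup_keys_foldl_modify_key dps pvIdOf ([]) (fun _ x v => v ++ [x])
      PySem.Dict.empty (by simp)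
  have hK1 : (dps.foldl pvAppStep PySem.Dict.empty).keys = PySem.Set.ofList (dps.map pvIdOf) :=
    PySem.Dict.keys_foldl_modify_key dps pvIdOf ([]) (fun _ x v => v ++ [x]) PySem.Dict.empty
  have hg1 : ∀ k, (dps.foldl pvAppStep PySem.Dict.empty).getD k []
      = dps.filter (fun dp => pvIdOf dp == k) := by
    intro k
    have h := pvFoldApp_getD dps PySem.Dict.empty k
    simpa [PySem.Dict.getD_empty] using h
  -- A's final dict
  have hKA : ((dps.foldl pvAppStep PySem.Dict.empty).items.foldl pvSortStep
      (dps.foldl pvAppStep PySem.Dict.empty)).keys = PySem.Set.ofList (dps.map pvIdOf) := by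
    have h : ((dps.foldl pvAppStep PySem.Dict.empty).items.foldl pvSortStep
        (dps.foldl pvAppStep PySem.Dict.empty)).keys
        = PySem.Set.update (dps.foldl pvAppStep PySem.Dict.empty).keys
            ((dps.foldl pvAppStep PySem.Dict.empty).items.map (·.1)) :=
      PySem.Dict.keys_foldl_insert_key _ (fun p : String × List (List (String × String)) => p.1)
        (fun _ p => PySem.List.sorted p.2 (fun x => pvTsOf x)) _
    rw [h, pvSet_update_self, hK1]
    intro y hy
    exact hy
  have hndA : ((dps.foldl pvAppStep PySem.Dict.empty).items.foldl pvSortStep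
      (dps.foldl pvAppStep PySem.Dict.empty)).keys.Nodup :=
    PySem.Dict.nodup_keys_foldl_insert_key _ (fun p : String × List (List (String × String)) => p.1)
      (fun _ p => PySem.List.sorted p.2 (fun x => pvTsOf x)) _ hnd1
  have hgA : ∀ k, k ∈ (dps.foldl pvAppStep PySem.Dict.empty).keys →
      ((dps.foldl pvAppStep PySem.Dict.empty).items.foldl pvSortStep
        (dps.foldl pvAppStep PySem.Dict.empty)).getD k []
      = PySem.List.sorted (dps.filter (fun dp => pvIdOf dp == k)) (fun x => pvTsOf x) := by
    intro k hk
    have hc : (dps.foldl pvAppStep PySem.Dict.empty).contains k = true :=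
      (PySem.Dict.contains_iff_mem_keys _ _).mpr hk
    rw [PySem.Dict.contains_eq_isSome_get?] at hc
    cases hv : (dps.foldl pvAppStep PySem.Dict.empty).get? k with
    | none => rw [hv] at hc; cases hc
    | some v =>
      have hmem := (PySem.Dict.get?_eq_some_iff_mem_items _ k v hnd1).mp hv
      have h := pvSortFold_getD_mem (dps.foldl pvAppStep PySem.Dict.empty).items
        (dps.foldl pvAppStep PySem.Dict.empty) k v hnd1 hmem
      rw [h]
      have hv' : v = dps.filter (fun dp => pvIdOf dp == k) := by
        have := PySem.Dict.getD_of_get?_eq_some (dps.foldl pvAppStep PySem.Dict.empty) ([]) hv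
        rw [hg1 k] at this
        exact this.symm
      rw [hv']
  -- compare item-by-item
  rw [PySem.Dict.items_eq_map_keys _ hndA ([]), hKA]
  have hIds : PySem.List.dedup (dps.map (fun dp => pvIdOf dp)) = PySem.Set.ofList (dps.map pvIdOf) := by
    simp [PySem.List.dedup_eq_ofList]
  rw [hIds]
  show _ = PySem.Dict.empty.items ++ _
  rw [show (PySem.Dict.empty : PySem.Dict String (List (List (String × String)))).items = [] from rfl,
    List.nil_append]
  refine List.map_congr_left (fun k hk => ?_)
  have hk1 : k ∈ (dps.foldl pvAppStep PySem.Dict.empty).keys := by rw [hK1]; exact hk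
  rw [hgA k hk1]
  rfl
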